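-- pv_equiv track=rewrite | github.com/pathanyawarkhan785/LeetCode | 2457. Minimum Addition to Make Integer Beautiful.py | makeIntegerBeautiful
-- ===== SOURCE A (Python) =====
-- def makeIntegerBeautiful(n: int, target: int) -> int:
--     current_sum = lambda x: sum(int(d) for d in str(x))
--     add = 0
--     current = n
--
--     while current_sum(current) > target:
--         digits = list(str(current))
--         carry_index = len(digits) - 1
--
--         while carry_index >= 0:
--             if digits[carry_index] != "0":
--                 break
--             carry_index -= 1
--
--         add += 10 ** (len(digits) - carry_index - 1)
--         current += 10 ** (len(digits) - carry_index - 1)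
--
--     return add
-- ===== SOURCE B (Python) =====
-- def makeIntegerBeautiful(n: int, target: int) -> int:
--     current_sum = lambda x: sum(int(d) for d in str(x))
--     k = 0
--     while True:
--         p = 10 ** k
--         candidate = ((n + p - 1) // p) * p   # n rounded up to a multiple of 10**k
--         if current_sum(candidate) <= target:
--             return candidate - n
--         k += 1
-- ===== Notes on version B (the rewrite author's own statement) =====
-- stated objective: faster
-- what changed: A rounds current up one carry at a time (repeatedly adding 10^z for the current trailing-zero count z until the digit sum fits); B instead scans k = 0, 1, 2, ... once, rounding n up to the next multiple of 10^k and returning the first round-up whose digit sum is within target.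
import Mathlib
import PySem

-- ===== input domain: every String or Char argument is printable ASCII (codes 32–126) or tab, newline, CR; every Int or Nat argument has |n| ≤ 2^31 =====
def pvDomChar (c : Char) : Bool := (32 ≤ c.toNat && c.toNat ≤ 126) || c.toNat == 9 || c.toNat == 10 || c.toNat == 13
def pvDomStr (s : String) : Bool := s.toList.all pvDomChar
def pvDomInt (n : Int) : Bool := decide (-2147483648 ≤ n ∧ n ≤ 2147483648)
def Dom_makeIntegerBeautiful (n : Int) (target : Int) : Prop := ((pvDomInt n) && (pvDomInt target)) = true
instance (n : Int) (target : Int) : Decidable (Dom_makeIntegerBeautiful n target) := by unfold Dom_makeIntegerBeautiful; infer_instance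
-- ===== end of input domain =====

-- B replaces A's one-carry-at-a-time increment loop with a single scan over the
-- positional round-ups of n (k = 0, 1, 2, …), returning the first one whose digit
-- sum fits: one loop iteration per decimal position instead of up to nine.

-- ===== PORT A =====

-- current_sum = lambda x: sum(int(d) for d in str(x)); `int(d)` is ported as
-- PySem.Int.ofChars? on the one-character string (exact; the `.getD 0` default is
-- never reached on inputs where Python returns, since every char of str(x) for
-- x ≥ 0 is a decimal digit).  Shared by both ports: both Pythons define the
-- identical digit-sum lambda.
def pvCurrentSum (x : Int) : Int :=
  ((PySem.Int.toChars x).map (fun d => (PySem.Int.ofChars? [d]).getD 0)).sum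

-- the inner `while carry_index >= 0: if digits[carry_index] != "0": break; carry_index -= 1`
-- loop, as structural recursion counting the index down (argument j means carry_index = j - 1;
-- j = 0 is carry_index = -1); the `.getD '0'` default is never reached (index in range).
def pvCarryIdx (digits : List Char) : Nat → Int
  | 0 => -1
  | j+1 => if ((PySem.List.pyGet? digits ((j : Nat) : Int)).getD '0') ≠ '0' then (j : Int) else pvCarryIdx digits j

-- the outer `while current_sum(current) > target` loop; Python's loop diverges when
-- target ≤ 0 < current, so the port uses fuel (10^11 steps is proved sufficient on
-- every input of Dom ∧ Pre_; the fuel-exhausted value is never reached there).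
def pvALoop (target : Int) : Nat → Int → Int → Int
  | 0, add, _ => add
  | fuel+1, add, current =>
    if pvCurrentSum current > target then
      let digits := PySem.Int.toChars current
      let ci := pvCarryIdx digits digits.length
      let p : Int := (10 : Int) ^ (((digits.length : Int) - ci - 1).toNat)
      pvALoop target fuel (add + p) (current + p)
    else add

def makeIntegerBeautiful (n : Int) (target : Int) : Int := pvALoop target 100000000000 0 n

-- ===== PORT B =====

-- `while True` over k = 0, 1, 2, …; fuel 64 (k ≤ 10 suffices on Dom ∧ Pre_, proved below).
def pvBLoop (n : Int) (target : Int) : Nat → Nat → Int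
  | 0, _ => 0
  | fuel+1, k =>
    let p : Int := (10 : Int) ^ k
    let candidate := PySem.Int.floordiv (n + p - 1) p * p
    if pvCurrentSum candidate ≤ target then candidate - n
    else pvBLoop n target fuel (k+1)

def makeIntegerBeautiful_alt (n : Int) (target : Int) : Int := pvBLoop n target 64 0

-- ===== PRECONDITION & SPEC =====

-- Pre_ excludes exactly the inputs on which Python A does not return: n < 0 (str(n)
-- contains '-', so int(d) raises ValueError) and target ≤ 0 with n > 0 (every round-up
-- of a positive n has digit sum ≥ 1, so A's while loop never exits); n = 0 is fine
-- whenever target ≥ 0.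
def Pre_makeIntegerBeautiful (n : Int) (target : Int) : Prop :=
  0 ≤ n ∧ (1 ≤ target ∨ (n = 0 ∧ 0 ≤ target))
instance (n : Int) (target : Int) : Decidable (Pre_makeIntegerBeautiful n target) := by
  unfold Pre_makeIntegerBeautiful; infer_instance

def pvWitness_makeIntegerBeautiful : Int × Int := (45, 3)

def Spec_makeIntegerBeautiful (n : Int) (target : Int) (out : Int) : Prop := out = makeIntegerBeautiful_alt n target
instance (n : Int) (target : Int) (out : Int) : Decidable (Spec_makeIntegerBeautiful n target out) := by unfold Spec_makeIntegerBeautiful; infer_instance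

-- ===== CLAIM (what is proved, stated in full; the proofs are below) =====
def Claim_equal_makeIntegerBeautiful : Prop := ∀ (n : Int) (target : Int), Dom_makeIntegerBeautiful n target → Pre_makeIntegerBeautiful n target → Spec_makeIntegerBeautiful n target (makeIntegerBeautiful n target)

-- ===== LEMMAS AND PROOFS =====

/- Mathematical vocabulary: pvSN c is the digit sum of c, pvZ c its number of
   trailing zeros, pvRup c k is c rounded up to the next multiple of 10^k
   (B's candidate).  The crux is `pv_step`: one iteration of A's loop does not
   change the first acceptable round-up. -/

def pvSN (c : ℕ) : ℕ := (Nat.digits 10 c).sum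
def pvRup (c k : ℕ) : ℕ := ((c + 10 ^ k - 1) / 10 ^ k) * 10 ^ k

def pvZ : ℕ → ℕ
  | 0 => 0
  | n+1 => if (n+1) % 10 = 0 then pvZ ((n+1)/10) + 1 else 0
  decreasing_by exact Nat.div_lt_self (by omega) (by norm_num)

-- ---- bridge: the ported digit-sum equals pvSN on nonnegative inputs ----

theorem pv_tdc (n : ℕ) (hn : 0 < n) : ∀ (fuel : ℕ), n < fuel → ∀ ds,
    Nat.toDigitsCore 10 fuel n ds = ((Nat.digits 10 n).map Nat.digitChar).reverse ++ ds := by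
  induction n using Nat.strong_induction_on with
  | _ n IH =>
    intro fuel hf ds
    match fuel, hf with
    | f+1, hf =>
      rw [Nat.toDigitsCore.eq_def]
      simp only []
      rw [Nat.digits_def' (by norm_num : 1 < 10) hn]
      by_cases h0 : n / 10 = 0
      · simp [h0]
      · rw [if_neg h0,
          IH (n/10) (Nat.div_lt_self hn (by norm_num)) (Nat.pos_of_ne_zero h0) f (by omega)]
        simp

theorem pv_toChars_pos (c : ℕ) (h : 0 < c) :
    PySem.Int.toChars (c : ℤ) = ((Nat.digits 10 c).map Nat.digitChar).reverse := by
  simp only [PySem.Int.toChars]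
  rw [if_neg (by omega)]
  simp only [Int.toNat_natCast, Nat.toDigits]
  rw [pv_tdc c h (c+1) (by omega)]
  simp

theorem pv_parse_digitChar (d : ℕ) (h : d < 10) :
    (PySem.Int.ofChars? [Nat.digitChar d]).getD 0 = (d : ℤ) := by
  interval_cases d <;> decide

theorem pv_digitChar_eq_zero_iff (d : ℕ) (h : d < 10) : (Nat.digitChar d = '0') ↔ d = 0 := by
  interval_cases d <;> decide

theorem pv_currentSum_eq (c : ℕ) : pvCurrentSum (c : ℤ) = (pvSN c : ℤ) := by
  rcases Nat.eq_zero_or_pos c with rfl | hc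
  · decide
  · unfold pvCurrentSum
    rw [pv_toChars_pos c hc, List.map_reverse, List.sum_reverse, List.map_map]
    rw [List.map_congr_left (fun d hd => by
      exact pv_parse_digitChar d (Nat.digits_lt_base (by norm_num) hd))]
    unfold pvSN
    exact (Nat.cast_list_sum _).symm

-- ---- bridge: the ported carry-index scan finds the trailing-zero count pvZ ----

theorem pvZ_pos_eq (c : ℕ) (hc : 0 < c) :
    pvZ c = if c % 10 = 0 then pvZ (c/10) + 1 else 0 := by
  match c, hc with
  | n+1, _ => rw [pvZ]

theorem pv_carryIdx_append (L : List Char) (x : Char) (j : ℕ) (h : j ≤ L.length) :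
    pvCarryIdx (L ++ [x]) j = pvCarryIdx L j := by
  induction j with
  | zero => rfl
  | succ j IH =>
    rw [pvCarryIdx, pvCarryIdx]
    have h1 : j < L.length := by omega
    have hg : PySem.List.pyGet? (L ++ [x]) ((j : ℕ) : ℤ) = PySem.List.pyGet? L ((j : ℕ) : ℤ) := by
      simp [PySem.List.pyGet?, PySem.List.pyIdx?, h1, Nat.le_of_lt h1]
    rw [hg, IH (by omega)]

theorem pv_get_concat (L : List Char) (x : Char) :
    (PySem.List.pyGet? (L ++ [x]) ((L.length : ℕ) : ℤ)).getD '0' = x := by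
  simp [PySem.List.pyGet?, PySem.List.pyIdx?]

theorem pv_scan (c : ℕ) (hc : 0 < c) :
    pvCarryIdx (((Nat.digits 10 c).map Nat.digitChar).reverse) (Nat.digits 10 c).length
      = ((Nat.digits 10 c).length : ℤ) - 1 - (pvZ c : ℤ) ∧ pvZ c < (Nat.digits 10 c).length := by
  induction c using Nat.strong_induction_on with
  | _ c IH =>
    rw [Nat.digits_def' (by norm_num : 1 < 10) hc]
    set L' := ((Nat.digits 10 (c/10)).map Nat.digitChar).reverse with hL'
    set len' := (Nat.digits 10 (c/10)).length with hlen0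
    have hlen' : L'.length = len' := by simp [hL', hlen0]
    have hget : (PySem.List.pyGet? (L' ++ [Nat.digitChar (c % 10)]) ((len' : ℕ) : ℤ)).getD '0'
        = Nat.digitChar (c % 10) := by
      rw [← hlen']; exact pv_get_concat _ _
    simp only [List.map_cons, List.reverse_cons, List.length_cons]
    rw [pvCarryIdx, hget]
    by_cases h0 : c % 10 = 0
    · have hc10 : 0 < c / 10 := Nat.div_pos (by omega) (by norm_num)
      have hchar : Nat.digitChar (c % 10) = '0' := by
        rw [pv_digitChar_eq_zero_iff _ (Nat.mod_lt _ (by norm_num))]; exact h0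
      rw [if_neg (by simp [hchar])]
      rw [pv_carryIdx_append L' _ _ (by omega)]
      obtain ⟨ih1, ih2⟩ := IH (c/10) (Nat.div_lt_self hc (by norm_num)) hc10
      rw [ih1, pvZ_pos_eq c hc, if_pos h0]
      constructor
      · push_cast; ring
      · omega
    · have hchar : Nat.digitChar (c % 10) ≠ '0' := by
        rw [Ne, pv_digitChar_eq_zero_iff _ (Nat.mod_lt _ (by norm_num))]; exact h0
      rw [if_pos (by simp [hchar])]
      rw [pvZ_pos_eq c hc, if_neg h0]
      constructor
      · push_cast; ring
      · omega

-- ---- arithmetic toolbox for the round-up function ----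

theorem pv_ceil_div (c X : ℕ) (h : 0 < X) :
    (c + X - 1) / X = if c % X = 0 then c / X else c / X + 1 := by
  have hd := Nat.div_add_mod c X
  have hx1 : X - 1 < X := by omega
  by_cases h0 : c % X = 0
  · rw [if_pos h0]
    have e : c + X - 1 = X * (c / X) + (X - 1) := by omega
    rw [e, Nat.mul_add_div h, Nat.div_eq_of_lt hx1, add_zero]
  · rw [if_neg h0]
    have hlt : c % X < X := Nat.mod_lt _ h
    have hx2 : c % X - 1 < X := by omega
    have e2 : X * (c / X + 1) = X * (c / X) + X := by ring
    have e : c + X - 1 = X * (c / X + 1) + (c % X - 1) := by omega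
    rw [e, Nat.mul_add_div h, Nat.div_eq_of_lt hx2]

theorem pv_rup_eq (c k : ℕ) :
    pvRup c k = if c % 10 ^ k = 0 then c else (c / 10 ^ k + 1) * 10 ^ k := by
  unfold pvRup
  rw [pv_ceil_div c _ (by positivity : 0 < 10 ^ k)]
  by_cases h0 : c % 10 ^ k = 0
  · rw [if_pos h0, if_pos h0, Nat.div_mul_cancel ((Nat.dvd_of_mod_eq_zero h0))]
  · rw [if_neg h0, if_neg h0]

theorem pv_rup_ge (c k : ℕ) : c ≤ pvRup c k := by
  rw [pv_rup_eq]
  have hd := Nat.div_add_mod c (10 ^ k)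
  have hlt : c % 10 ^ k < 10 ^ k := Nat.mod_lt _ (by positivity : 0 < 10 ^ k)
  by_cases h0 : c % 10 ^ k = 0
  · rw [if_pos h0]
  · rw [if_neg h0]
    have e2 : (c / 10 ^ k + 1) * 10 ^ k = 10 ^ k * (c / 10 ^ k) + 10 ^ k := by ring
    omega

theorem pv_rup_le (c k : ℕ) : pvRup c k ≤ c + 10 ^ k := by
  rw [pv_rup_eq]
  have hd := Nat.div_add_mod c (10 ^ k)
  by_cases h0 : c % 10 ^ k = 0
  · rw [if_pos h0]; omega
  · rw [if_neg h0]
    have hlt : c % 10 ^ k < 10 ^ k := Nat.mod_lt _ (by positivity)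
    have e2 : (c / 10 ^ k + 1) * 10 ^ k = 10 ^ k * (c / 10 ^ k) + 10 ^ k := by ring
    omega

theorem pv_rup_dvd (c k : ℕ) : 10 ^ k ∣ pvRup c k := by
  rw [pv_rup_eq]
  by_cases h0 : c % 10 ^ k = 0
  · rw [if_pos h0]; exact Nat.dvd_of_mod_eq_zero h0
  · rw [if_neg h0]; exact Dvd.intro_left _ rfl

theorem pv_rup_of_dvd (c k : ℕ) (h : 10 ^ k ∣ c) : pvRup c k = c := by
  rw [pv_rup_eq, if_pos (Nat.dvd_iff_mod_eq_zero.mp h)]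

theorem pv_div_shift (A X B r : ℕ) (hB : 0 < B) (hr : r < B) :
    (A * B + r) / (X * B) = A / X := by
  rw [mul_comm X B, ← Nat.div_div_eq_div_mul, mul_comm A B, Nat.mul_add_div hB,
    Nat.div_eq_of_lt hr, add_zero]

theorem pv_rup_shift (m z j : ℕ) :
    pvRup (m * 10 ^ z) (z + j) = ((m + 10 ^ j - 1) / 10 ^ j) * 10 ^ j * 10 ^ z := by
  have hz : (0:ℕ) < 10 ^ z := by positivity
  have hj : (0:ℕ) < 10 ^ j := by positivity
  have e1 : (m + 10 ^ j - 1) * 10 ^ z = m * 10 ^ z + 10 ^ j * 10 ^ z - 10 ^ z := by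
    rw [Nat.sub_mul, add_mul, one_mul]
  have e2 : m * 10 ^ z + 10 ^ (z + j) - 1 = (m + 10 ^ j - 1) * 10 ^ z + (10 ^ z - 1) := by
    rw [e1, pow_add, mul_comm (10 ^ z) (10 ^ j)]
    have : 10 ^ z ≤ m * 10 ^ z + 10 ^ j * 10 ^ z := by nlinarith
    omega
  unfold pvRup
  rw [e2, show (10:ℕ) ^ (z + j) = 10 ^ j * 10 ^ z from by rw [pow_add, mul_comm],
    pv_div_shift _ _ _ _ hz (by omega), mul_assoc]

theorem pv_rup_high (m z j : ℕ) (hm10 : m % 10 ≠ 0) (hj : 0 < j) :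
    pvRup ((m + 1) * 10 ^ z) (z + j) = pvRup (m * 10 ^ z) (z + j) := by
  have hj10 : (0:ℕ) < 10 ^ j := by positivity
  have hnd : m % 10 ^ j ≠ 0 := by
    intro h
    have h10 : (10:ℕ) ∣ m :=
      dvd_trans (dvd_pow_self 10 hj.ne') (Nat.dvd_of_mod_eq_zero h)
    exact hm10 (Nat.dvd_iff_mod_eq_zero.mp h10)
  rw [pv_rup_shift, pv_rup_shift]
  congr 2
  rw [show m + 1 + 10 ^ j - 1 = m + 10 ^ j from by omega, Nat.add_div_right _ hj10,
    pv_ceil_div _ _ hj10, if_neg hnd]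

theorem pv_rup_mid (m z j : ℕ) (hj : 0 < j) (hdvd : 10 ^ j ∣ m + 1) :
    pvRup (m * 10 ^ z) (z + j) = (m + 1) * 10 ^ z := by
  have hj10 : (1:ℕ) < 10 ^ j := by
    calc (1:ℕ) < 10 ^ 1 := by norm_num
    _ ≤ 10 ^ j := Nat.pow_le_pow_right (by norm_num) (by omega)
  obtain ⟨D, hD⟩ := hdvd
  rw [pv_rup_shift]
  have e : m + 10 ^ j - 1 = 10 ^ j * D + (10 ^ j - 2) := by omega
  rw [e, Nat.mul_add_div (by omega), Nat.div_eq_of_lt (by omega), add_zero, hD]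
  ring

-- ---- digit-sum facts ----

theorem pvSN_mul_pow (x k : ℕ) : pvSN (x * 10 ^ k) = pvSN x := by
  induction k with
  | zero => simp
  | succ k IH =>
    have step : ∀ y : ℕ, pvSN (y * 10) = pvSN y := by
      intro y
      rcases Nat.eq_zero_or_pos y with rfl | hy
      · simp
      · unfold pvSN
        rw [Nat.digits_def' (by norm_num : 1 < 10) (by positivity),
          Nat.mul_mod_left, Nat.mul_div_cancel _ (by norm_num : 0 < 10)]
        simp
    rw [pow_succ, ← mul_assoc, step, IH]

theorem pvSN_succ (m : ℕ) (h : m % 10 ≠ 9) : pvSN (m + 1) = pvSN m + 1 := by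
  rcases Nat.eq_zero_or_pos m with rfl | hm
  · simp [pvSN]
  · have h1 : (m + 1) % 10 = m % 10 + 1 := by omega
    have h2 : (m + 1) / 10 = m / 10 := by omega
    unfold pvSN
    rw [Nat.digits_def' (by norm_num : 1 < 10) (by omega),
      Nat.digits_def' (by norm_num : 1 < 10) hm, h1, h2]
    simp
    omega

-- ---- trailing-zero facts ----

theorem pvZ_decomp (c : ℕ) (hc : 0 < c) :
    c = (c / 10 ^ pvZ c) * 10 ^ pvZ c ∧ (c / 10 ^ pvZ c) % 10 ≠ 0 := by
  induction c using Nat.strong_induction_on with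
  | _ c IH =>
    rw [pvZ_pos_eq c hc]
    by_cases h0 : c % 10 = 0
    · have hc10 : 0 < c / 10 := Nat.div_pos (by omega) (by norm_num)
      obtain ⟨h1, h2⟩ := IH (c/10) (Nat.div_lt_self hc (by norm_num)) hc10
      have e : c / (10 ^ pvZ (c/10) * 10) = c / 10 / 10 ^ pvZ (c/10) := by
        rw [mul_comm, ← Nat.div_div_eq_div_mul]
      rw [if_pos h0]
      constructor
      · rw [pow_succ, e]
        calc c = c / 10 * 10 := by omega
        _ = (c / 10 / 10 ^ pvZ (c/10) * 10 ^ pvZ (c/10)) * 10 := by rw [← h1]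
        _ = _ := by rw [mul_assoc]
      · rw [pow_succ, e]; exact h2
    · rw [if_neg h0]; simpa using h0

theorem pvZ_mul_pow (x : ℕ) (hx : 0 < x) (z : ℕ) : pvZ (x * 10 ^ z) = pvZ x + z := by
  induction z with
  | zero => simp
  | succ k IH =>
    have hpos : 0 < x * 10 ^ (k+1) := by positivity
    rw [pvZ_pos_eq _ hpos, if_pos (by rw [pow_succ, ← mul_assoc]; omega)]
    rw [pow_succ, ← mul_assoc, Nat.mul_div_cancel _ (by norm_num), IH]
    omega

-- ---- candidate lists before and after one A-step ----

theorem pv_cands_high (m z k : ℕ) (hm10 : m % 10 ≠ 0) (hk : z < k) :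
    pvRup ((m + 1) * 10 ^ z) k = pvRup (m * 10 ^ z) k := by
  have := pv_rup_high m z (k - z) hm10 (by omega)
  rwa [show z + (k - z) = k from by omega] at this

theorem pv_cands_low (c k z : ℕ) (hd : 10 ^ z ∣ c) (hk : k ≤ z) : pvRup c k = c :=
  pv_rup_of_dvd c k (dvd_trans (pow_dvd_pow 10 hk) hd)

-- ---- the key step lemma: one iteration of A's loop keeps the answer ----

theorem pv_step (c : ℕ) (t : ℤ) (hc : 0 < c)
    (hbad : ¬((pvSN c : ℤ) ≤ t))
    (h : ∃ k, (pvSN (pvRup c k) : ℤ) ≤ t)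
    (h' : ∃ k, (pvSN (pvRup (c + 10 ^ pvZ c) k) : ℤ) ≤ t) :
    pvRup (c + 10 ^ pvZ c) (Nat.find h') = pvRup c (Nat.find h) := by
  set z := pvZ c with hz
  set m := c / 10 ^ z with hm
  obtain ⟨hmc, hm10⟩ := pvZ_decomp c hc
  rw [← hm, ← hz] at hmc
  have hzpos : (0:ℕ) < 10 ^ z := by positivity
  have hc' : c + 10 ^ z = (m + 1) * 10 ^ z := by rw [add_mul, one_mul, ← hmc]
  have hdvdc : 10 ^ z ∣ c := hmc ▸ Dvd.intro_left m rfl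
  have hdvdc' : 10 ^ z ∣ c + 10 ^ z := hc' ▸ Dvd.intro_left (m+1) rfl
  have hk0 : z < Nat.find h := by
    rw [Nat.lt_find_iff]
    intro k hk
    rw [pv_cands_low c k z hdvdc hk]
    exact hbad
  by_cases hm9 : (m + 1) % 10 = 0
  · -- carry case: 10 ∣ m+1
    by_cases hgood : (pvSN (c + 10 ^ z) : ℤ) ≤ t
    · -- both results equal c + 10^z
      have hfind0 : Nat.find h' = 0 := by
        rw [Nat.find_eq_zero]
        rwa [pv_cands_low _ 0 z hdvdc' (by omega)]
      have hmid : pvRup c (z + 1) = c + 10 ^ z := by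
        rw [hc', hmc, pv_rup_mid m z 1 (by omega) (by omega : (10:ℕ)^1 ∣ m + 1)]
      have hle : Nat.find h ≤ z + 1 := Nat.find_min' h (by rw [hmid]; exact hgood)
      have : Nat.find h = z + 1 := by omega
      rw [hfind0, this, hmid, pv_cands_low _ 0 z hdvdc' (by omega)]
    · -- neither c (k ≤ z) nor c+10^z (k ≤ z') is acceptable: both finds agree above z'
      have hcpos' : 0 < c + 10 ^ z := by omega
      set z' := pvZ (c + 10 ^ z) with hz'
      obtain ⟨hmc', hm10'⟩ := pvZ_decomp (c + 10 ^ z) hcpos'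
      have hdvdz' : ∀ k ≤ z', (10:ℕ) ^ k ∣ c + 10 ^ z := fun k hk =>
        dvd_trans (pow_dvd_pow 10 hk) (hmc' ▸ Dvd.intro_left _ rfl)
      have hzz' : z ≤ z' := by
        have : pvZ ((m + 1) * 10 ^ z) = pvZ (m + 1) + z :=
          pvZ_mul_pow (m + 1) (Nat.succ_pos m) z
        rw [hz', hc', this]; omega
      have hmid : ∀ k, z < k → k ≤ z' → pvRup c k = c + 10 ^ z := by
        intro k hk1 hk2
        have hdvd1 : 10 ^ (k - z) ∣ m + 1 := by
          have h1 : 10 ^ (k - z) * 10 ^ z ∣ (m + 1) * 10 ^ z := by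
            rw [← pow_add, show k - z + z = k from by omega, ← hc']
            exact hdvdz' k hk2
          exact (Nat.mul_dvd_mul_iff_right hzpos).mp h1
        have := pv_rup_mid m z (k - z) (by omega) hdvd1
        rw [show z + (k - z) = k from by omega] at this
        rw [hmc, this, add_mul, one_mul]
      have hk0' : z' < Nat.find h' := by
        rw [Nat.lt_find_iff]
        intro k hk
        rw [pv_cands_low _ k z' (hmc' ▸ Dvd.intro_left _ rfl) hk]
        exact hgood
      have hk0z : z' < Nat.find h := by
        rw [Nat.lt_find_iff]
        intro k hk
        rcases Nat.lt_or_ge z k with h1 | h1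
        · rw [hmid k h1 hk]; exact hgood
        · rw [pv_cands_low c k z hdvdc (by omega)]; exact hbad
      have heqc : ∀ k, z < k → pvRup (c + 10 ^ z) k = pvRup c k := by
        intro k hk
        rw [hc', hmc]
        exact pv_cands_high m z k hm10 hk
      have hle1 : Nat.find h' ≤ Nat.find h :=
        Nat.find_min' h' (by rw [heqc _ (by omega)]; exact Nat.find_spec h)
      have hle2 : Nat.find h ≤ Nat.find h' :=
        Nat.find_min' h (by rw [← heqc _ (by omega : z < Nat.find h')]; exact Nat.find_spec h')
      have heq : Nat.find h = Nat.find h' := by omega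
      rw [← heq, heqc _ (by omega)]
  · -- no carry: the digit sum grew by one, c + 10^z is still unacceptable
    have hSN : pvSN (c + 10 ^ z) = pvSN c + 1 := by
      rw [hc', hmc, pvSN_mul_pow, pvSN_mul_pow, pvSN_succ m (by omega)]
    have hgood' : ¬((pvSN (c + 10 ^ z) : ℤ) ≤ t) := by
      rw [hSN]; push_cast; omega
    have hk0' : z < Nat.find h' := by
      rw [Nat.lt_find_iff]
      intro k hk
      rw [pv_cands_low _ k z hdvdc' hk]
      exact hgood'
    have heqc : ∀ k, z < k → pvRup (c + 10 ^ z) k = pvRup c k := by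
      intro k hk
      rw [hc', hmc]
      exact pv_cands_high m z k hm10 hk
    have hle1 : Nat.find h' ≤ Nat.find h :=
      Nat.find_min' h' (by rw [heqc _ hk0]; exact Nat.find_spec h)
    have hle2 : Nat.find h ≤ Nat.find h' :=
      Nat.find_min' h (by rw [← heqc _ hk0']; exact Nat.find_spec h')
    have heq : Nat.find h = Nat.find h' := by omega
    rw [← heq, heqc _ (by omega)]

-- the answer lies at least one A-step ahead of a still-unacceptable current
theorem pv_step_le (c : ℕ) (t : ℤ) (hc : 0 < c)
    (hbad : ¬((pvSN c : ℤ) ≤ t))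
    (h : ∃ k, (pvSN (pvRup c k) : ℤ) ≤ t) :
    c + 10 ^ pvZ c ≤ pvRup c (Nat.find h) := by
  set z := pvZ c with hz
  set m := c / 10 ^ z with hm
  obtain ⟨hmc, hm10⟩ := pvZ_decomp c hc
  rw [← hm, ← hz] at hmc
  have hzpos : (0:ℕ) < 10 ^ z := by positivity
  have hdvdc : 10 ^ z ∣ c := hmc ▸ Dvd.intro_left m rfl
  have hk0 : z < Nat.find h := by
    rw [Nat.lt_find_iff]
    intro k hk
    rw [pv_cands_low c k z hdvdc hk]
    exact hbad
  have hdvdB : 10 ^ (z + 1) ∣ pvRup c (Nat.find h) :=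
    dvd_trans (pow_dvd_pow 10 (by omega)) (pv_rup_dvd c (Nat.find h))
  obtain ⟨b, hb⟩ : 10 ^ z ∣ pvRup c (Nat.find h) :=
    dvd_trans (pow_dvd_pow 10 (by omega)) hdvdB
  rw [mul_comm] at hb
  have hge : c ≤ pvRup c (Nat.find h) := pv_rup_ge c _
  have hne : pvRup c (Nat.find h) ≠ c := by
    intro he
    have h1 : 10 * 10 ^ z ∣ m * 10 ^ z := by
      rw [mul_comm 10 (10 ^ z), ← pow_succ, ← hmc]
      exact he ▸ hdvdB
    have h2 : (10:ℕ) ∣ m := (Nat.mul_dvd_mul_iff_right hzpos).mp h1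
    exact hm10 (Nat.dvd_iff_mod_eq_zero.mp h2)
  have hmb : m < b := by
    have : m * 10 ^ z < b * 10 ^ z := by
      rw [← hmc, ← hb]
      omega
    exact Nat.lt_of_mul_lt_mul_right this
  calc c + 10 ^ z = (m + 1) * 10 ^ z := by rw [add_mul, one_mul, ← hmc]
  _ ≤ b * 10 ^ z := Nat.mul_le_mul_right _ (by omega)
  _ = pvRup c (Nat.find h) := hb.symm

-- ---- an acceptable round-up exists, and (on Dom) is found by k = 10 ----

theorem pvSN_zero : pvSN 0 = 0 := by simp [pvSN]

theorem pvSN_one : pvSN 1 = 1 := by simp [pvSN]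

theorem pvEx (c : ℕ) (t : ℤ) (ht : 1 ≤ t ∨ (c = 0 ∧ 0 ≤ t)) :
    ∃ k, (pvSN (pvRup c k) : ℤ) ≤ t := by
  rcases Nat.eq_zero_or_pos c with rfl | hc
  · refine ⟨0, ?_⟩
    rw [pv_rup_of_dvd 0 0 (dvd_zero _), pvSN_zero]
    rcases ht with h1 | h1
    · omega
    · exact_mod_cast h1.2
  · have ht1 : 1 ≤ t := by rcases ht with h1 | h1; exact h1; omega
    refine ⟨c, ?_⟩
    have hlt : c < 10 ^ c := Nat.lt_pow_self (by norm_num)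
    have h0 : c % 10 ^ c = c := Nat.mod_eq_of_lt hlt
    rw [pv_rup_eq, if_neg (by omega), Nat.div_eq_of_lt hlt, zero_add, one_mul,
      show (10:ℕ) ^ c = 1 * 10 ^ c from (one_mul _).symm, pvSN_mul_pow, pvSN_one]
    exact ht1

theorem pv_good10 (c : ℕ) (t : ℤ) (hcb : c ≤ 10 ^ 10) (ht : 1 ≤ t ∨ (c = 0 ∧ 0 ≤ t)) :
    (pvSN (pvRup c 10) : ℤ) ≤ t := by
  rcases Nat.eq_zero_or_pos c with rfl | hc
  · rw [pv_rup_of_dvd 0 10 (dvd_zero _), pvSN_zero]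
    rcases ht with h1 | h1
    · omega
    · exact_mod_cast h1.2
  · have ht1 : 1 ≤ t := by rcases ht with h1 | h1; exact h1; omega
    have h1 : pvRup c 10 = 10 ^ 10 := by
      rw [pv_rup_eq]
      by_cases h0 : c % 10 ^ 10 = 0
      · rw [if_pos h0]
        exact Nat.le_antisymm hcb (Nat.le_of_dvd hc (Nat.dvd_of_mod_eq_zero h0))
      · rw [if_neg h0]
        have hlt : c < 10 ^ 10 := by
          rcases Nat.lt_or_ge c (10 ^ 10) with hx | hx
          · exact hx
          · exfalso; apply h0
            rw [show c = 10 ^ 10 from by omega]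
            simp
        rw [Nat.div_eq_of_lt hlt, zero_add, one_mul]
    rw [h1, show (10:ℕ) ^ 10 = 1 * 10 ^ 10 from (one_mul _).symm, pvSN_mul_pow, pvSN_one]
    exact ht1

-- ---- A's loop computes the first acceptable round-up ----

theorem pv_aloop (t : ℤ) : ∀ (N : ℕ) (c : ℕ), (1 ≤ t ∨ (c = 0 ∧ 0 ≤ t)) →
    ∀ (h : ∃ k, (pvSN (pvRup c k) : ℤ) ≤ t), pvRup c (Nat.find h) - c < N →
    ∀ add : ℤ, pvALoop t N add (c : ℤ) = add + (pvRup c (Nat.find h) : ℤ) - (c : ℤ) := by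
  intro N
  induction N with
  | zero => intro c ht h hlt add; omega
  | succ N IH =>
    intro c ht h hlt add
    by_cases hgood : (pvSN c : ℤ) ≤ t
    · have hng : ¬ pvCurrentSum (c:ℤ) > t := by rw [pv_currentSum_eq]; omega
      have hr0 : pvRup c 0 = c := pv_rup_of_dvd c 0 (by simpa using one_dvd c)
      have h0 : Nat.find h = 0 := by
        rw [Nat.find_eq_zero]; rwa [hr0]
      rw [pvALoop, if_neg hng, h0, hr0]
      ring
    · have hcpos : 0 < c := by
        rcases Nat.eq_zero_or_pos c with rfl | hp
        · exfalso; apply hgood; rw [pvSN_zero]; rcases ht with h1 | h1 <;> push_cast <;> omega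
        · exact hp
      have ht1 : 1 ≤ t := by
        rcases ht with h1 | h1
        · exact h1
        · omega
      have hyes : pvCurrentSum (c:ℤ) > t := by rw [pv_currentSum_eq]; omega
      obtain ⟨hsc, hsl⟩ := pv_scan c hcpos
      have hL : PySem.Int.toChars (c:ℤ) = ((Nat.digits 10 c).map Nat.digitChar).reverse :=
        pv_toChars_pos c hcpos
      have hlen : (PySem.Int.toChars (c:ℤ)).length = (Nat.digits 10 c).length := by
        rw [hL]; simp
      have hci : pvCarryIdx (PySem.Int.toChars (c:ℤ)) (PySem.Int.toChars (c:ℤ)).length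
          = ((Nat.digits 10 c).length : ℤ) - 1 - (pvZ c : ℤ) := by
        rw [hL, show ((List.map Nat.digitChar (Nat.digits 10 c)).reverse).length
            = (Nat.digits 10 c).length from by simp]
        exact hsc
      have hexp : (((PySem.Int.toChars (c:ℤ)).length : ℤ)
            - pvCarryIdx (PySem.Int.toChars (c:ℤ)) (PySem.Int.toChars (c:ℤ)).length - 1).toNat
          = pvZ c := by
        rw [hci, hlen]; omega
      have h' : ∃ k, (pvSN (pvRup (c + 10 ^ pvZ c) k) : ℤ) ≤ t :=
        pvEx (c + 10 ^ pvZ c) t (Or.inl ht1)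
      have hstepeq := pv_step c t hcpos hgood h h'
      have hstle := pv_step_le c t hcpos hgood h
      have hzpos : (0:ℕ) < 10 ^ pvZ c := by positivity
      have hcast : ((c:ℤ) + (10:ℤ) ^ pvZ c) = (((c + 10 ^ pvZ c : ℕ)) : ℤ) := by push_cast; ring
      rw [pvALoop, if_pos hyes]
      simp only [hexp, hcast]
      rw [IH (c + 10 ^ pvZ c) (Or.inl ht1) h' (by omega) (add + (10:ℤ) ^ pvZ c), hstepeq]
      push_cast
      ring

-- ---- B's loop computes the first acceptable round-up ----

theorem pv_bloop (c : ℕ) (t : ℤ) (h : ∃ k, (pvSN (pvRup c k) : ℤ) ≤ t) :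
    ∀ (F kk : ℕ), kk ≤ Nat.find h → Nat.find h < kk + F →
    pvBLoop (c:ℤ) t F kk = ((pvRup c (Nat.find h) : ℕ) : ℤ) - (c:ℤ) := by
  intro F
  induction F with
  | zero => intro kk h1 h2; omega
  | succ F IH =>
    intro kk h1 h2
    have h1n : (1:ℕ) ≤ c + 10 ^ kk := by
      have : (0:ℕ) < 10 ^ kk := by positivity
      omega
    have hcand : PySem.Int.floordiv ((c:ℤ) + (10:ℤ)^kk - 1) ((10:ℤ)^kk) * (10:ℤ)^kk
        = ((pvRup c kk : ℕ) : ℤ) := by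
      have e1 : (c:ℤ) + (10:ℤ)^kk - 1 = ((c + 10^kk - 1 : ℕ) : ℤ) := by
        push_cast [h1n]; ring
      rw [e1, show ((10:ℤ)^kk) = ((10^kk : ℕ) : ℤ) from by push_cast; ring,
        PySem.Int.floordiv_natCast]
      unfold pvRup
      push_cast
      ring
    simp only [pvBLoop]
    rw [hcand, pv_currentSum_eq]
    by_cases hg : (pvSN (pvRup c kk) : ℤ) ≤ t
    · rw [if_pos hg]
      have heq : Nat.find h = kk := le_antisymm (Nat.find_min' h hg) h1
      rw [heq]
    · rw [if_neg hg]
      have hne : kk ≠ Nat.find h := fun he => hg (he ▸ Nat.find_spec h)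
      exact IH (kk+1) (by omega) (by omega)

-- ===== VERDICT (by name: the statement is the Claim_ definition above) =====
theorem makeIntegerBeautiful_spec : Claim_equal_makeIntegerBeautiful := by
  intro n t hdom hpre
  obtain ⟨hn0, hts⟩ := hpre
  unfold Spec_makeIntegerBeautiful
  have hnc : ((n.toNat : ℕ) : ℤ) = n := Int.toNat_of_nonneg hn0
  set c := n.toNat with hc
  have ht : 1 ≤ t ∨ (c = 0 ∧ 0 ≤ t) := by
    rcases hts with h1 | h1
    · exact Or.inl h1
    · exact Or.inr ⟨by rw [hc, h1.1]; rfl, h1.2⟩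
  have h := pvEx c t ht
  have hbound : n ≤ 2147483648 := by
    unfold Dom_makeIntegerBeautiful pvDomInt at hdom
    simp only [Bool.and_eq_true, decide_eq_true_eq] at hdom
    exact hdom.1.2
  have hcb : c ≤ 10 ^ 10 := by
    have h1 : (c:ℤ) ≤ 2147483648 := hnc ▸ hbound
    have h2 : c ≤ 2147483648 := by exact_mod_cast h1
    calc c ≤ 2147483648 := h2
    _ ≤ 10 ^ 10 := by norm_num
  have hfind10 : Nat.find h ≤ 10 := Nat.find_min' h (pv_good10 c t hcb ht)
  have hrle : pvRup c (Nat.find h) ≤ c + 10 ^ 10 :=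
    le_trans (pv_rup_le c _)
      (Nat.add_le_add_left (Nat.pow_le_pow_right (by norm_num) hfind10) c)
  have h10 : (10:ℕ) ^ 10 = 10000000000 := by norm_num
  rw [← hnc]
  unfold makeIntegerBeautiful makeIntegerBeautiful_alt
  rw [pv_aloop t 100000000000 c ht h (by omega) 0,
    pv_bloop c t h 64 0 (by omega) (by omega)]
  ring
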